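-- pv_equiv track=rewrite | github.com/AdamUtwagani/-Python-Learning-Journey | test.py | dp
-- ===== SOURCE A (Python) =====
-- def dp(i, n, card, current_sum):
--     if i == n:
--         return 0
--     elif current_sum + card[i] >= i:
--         # Option 1: pick this card
--         pick = 1 + dp(i + 1, n, card, current_sum + card[i])
--         # Option 2: skip this card
--         skip = dp(i + 1, n, card, current_sum)
--         return max(pick, skip)
--     else:
--         return dp(i + 1, n, card, current_sum)
-- ===== SOURCE B (Python) =====
-- def dp(i, n, card, current_sum):
--     cache = {}
--
--     def go(j, s):
--         if j == n:
--             return 0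
--         key = (j, s)
--         if key in cache:
--             return cache[key]
--         c = card[j]
--         if s + c >= j:
--             res = max(1 + go(j + 1, s + c), go(j + 1, s))
--         else:
--             res = go(j + 1, s)
--         cache[key] = res
--         return res
--
--     return go(i, current_sum)
-- ===== Notes on version B (the rewrite author's own statement) =====
-- stated objective: alternative
-- what changed: Replaces the plain exponential branching recursion with top-down recursion memoized on (index, current_sum), so each reachable state is solved once (intended as faster; a timing run measured 12x at n=256 but both recursions hit Python's depth limit at n=1024, so 'faster' is unconfirmed).
import Mathlib
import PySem

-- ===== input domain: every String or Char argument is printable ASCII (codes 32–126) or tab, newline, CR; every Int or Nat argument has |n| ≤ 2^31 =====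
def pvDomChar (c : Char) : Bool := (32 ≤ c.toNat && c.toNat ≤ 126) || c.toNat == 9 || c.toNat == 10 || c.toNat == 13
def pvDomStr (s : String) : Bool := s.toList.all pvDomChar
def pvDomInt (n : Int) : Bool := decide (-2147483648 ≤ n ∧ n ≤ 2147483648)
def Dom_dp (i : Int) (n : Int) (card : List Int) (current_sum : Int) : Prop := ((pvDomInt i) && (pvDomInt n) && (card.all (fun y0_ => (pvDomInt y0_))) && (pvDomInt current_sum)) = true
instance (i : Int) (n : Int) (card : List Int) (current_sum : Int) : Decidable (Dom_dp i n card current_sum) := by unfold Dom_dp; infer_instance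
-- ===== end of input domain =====

-- B memoizes the recursion on (index, current_sum) so each reachable state is solved once, instead of A's plain branching recursion.

-- ===== PORT A =====
-- fuel (n - i).toNat counts the remaining recursion depth; under Pre_dp it never runs out.
def dpAgo (n : Int) (card : List Int) : Nat → Int → Int → Int
  | fuel, i, s =>
    if i = n then 0
    else
      match fuel with
      | 0 => 0  -- unreachable under Pre_dp
      | Nat.succ f =>
        match PySem.List.pyGet? card i with
        | none => 0  -- IndexError, excluded by Pre_dp
        | some c =>
          if i ≤ s + c then
            max (1 + dpAgo n card f (i + 1) (s + c)) (dpAgo n card f (i + 1) s)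
          else
            dpAgo n card f (i + 1) s

def dp (i : Int) (n : Int) (card : List Int) (current_sum : Int) : Int :=
  dpAgo n card (n - i).toNat i current_sum

-- ===== PORT B =====
-- memoized recursion: thread the cache (Python dict keyed by (j, s)) through the calls
def dpBgo (n : Int) (card : List Int) :
    Nat → Int → Int → PySem.Dict (Int × Int) Int → Int × PySem.Dict (Int × Int) Int
  | fuel, j, s, cache =>
    if j = n then (0, cache)
    else
      match PySem.Dict.get? cache (j, s) with
      | some v => (v, cache)
      | none =>
        match fuel with
        | 0 => (0, cache)  -- unreachable under Pre_dp
        | Nat.succ f =>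
          match PySem.List.pyGet? card j with
          | none => (0, cache)  -- IndexError, excluded by Pre_dp
          | some c =>
            let rc :=
              if j ≤ s + c then
                let pc := dpBgo n card f (j + 1) (s + c) cache
                let kc := dpBgo n card f (j + 1) s pc.2
                (max (1 + pc.1) kc.1, kc.2)
              else
                dpBgo n card f (j + 1) s cache
            (rc.1, PySem.Dict.insert rc.2 (j, s) rc.1)

def dp_alt (i : Int) (n : Int) (card : List Int) (current_sum : Int) : Int :=
  (dpBgo n card (n - i).toNat i current_sum PySem.Dict.empty).1

-- ===== PRECONDITION & SPEC =====
-- Pre_dp = exactly the inputs where Python A returns: the recursion reaches i = n and every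
-- visited index i, i+1, …, n-1 is a valid (possibly negative) Python index into card.
def Pre_dp (i : Int) (n : Int) (card : List Int) (current_sum : Int) : Prop :=
  i ≤ n ∧ (i = n ∨ (-(card.length : Int) ≤ i ∧ n ≤ (card.length : Int)))
instance (i : Int) (n : Int) (card : List Int) (current_sum : Int) : Decidable (Pre_dp i n card current_sum) := by unfold Pre_dp; infer_instance

def pvWitness_dp : Int × Int × List Int × Int := (0, 3, [2, -1, 3], 0)

def Spec_dp (i : Int) (n : Int) (card : List Int) (current_sum : Int) (out : Int) : Prop := out = dp_alt i n card current_sum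
instance (i : Int) (n : Int) (card : List Int) (current_sum : Int) (out : Int) : Decidable (Spec_dp i n card current_sum out) := by unfold Spec_dp; infer_instance

-- ===== CLAIM (what is proved, stated in full; the proofs are below) =====
def Claim_equal_dp : Prop := ∀ (i : Int) (n : Int) (card : List Int) (current_sum : Int), Dom_dp i n card current_sum → Pre_dp i n card current_sum → Spec_dp i n card current_sum (dp i n card current_sum)

-- ===== LEMMAS AND PROOFS =====

-- invariant on the cache: every stored value is the A-value of its key
def CacheInv (n : Int) (card : List Int) (cache : PySem.Dict (Int × Int) Int) : Prop :=
  ∀ (j s v : Int), PySem.Dict.get? cache (j, s) = some v →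
    dpAgo n card (n - j).toNat j s = v

theorem dpBgo_correct (n : Int) (card : List Int) :
    ∀ (f : Nat) (i s : Int) (cache : PySem.Dict (Int × Int) Int),
      i ≤ n → (n - i).toNat ≤ f → CacheInv n card cache →
      (dpBgo n card f i s cache).1 = dpAgo n card (n - i).toNat i s ∧
      CacheInv n card (dpBgo n card f i s cache).2 := by
  intro f
  induction f with
  | zero =>
    intro i s cache hin hf hinv
    have : i = n := by omega
    subst this
    constructor <;> simp [dpBgo, dpAgo, hinv]
  | succ f ih =>
    intro i s cache hin hf hinv
    by_cases h : i = n
    · subst h; constructor <;> simp [dpBgo, dpAgo, hinv]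
    · have hlt : i < n := lt_of_le_of_ne hin h
      have hfe : (n - i).toNat = (n - (i + 1)).toNat + 1 := by omega
      have h1 : (n - (i + 1)).toNat ≤ f := by omega
      simp only [dpBgo, if_neg h]
      cases hc : PySem.Dict.get? cache (i, s) with
      | some v =>
        exact ⟨(hinv i s v hc).symm, hinv⟩
      | none =>
        cases hg : PySem.List.pyGet? card i with
        | none =>
          refine ⟨?_, hinv⟩
          rw [hfe]
          simp [dpAgo, h, hg]
        | some c =>
          have hA : dpAgo n card (n - i).toNat i s =
              if i ≤ s + c then
                max (1 + dpAgo n card (n - (i + 1)).toNat (i + 1) (s + c))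
                    (dpAgo n card (n - (i + 1)).toNat (i + 1) s)
              else dpAgo n card (n - (i + 1)).toNat (i + 1) s := by
            rw [hfe]
            simp only [dpAgo, if_neg h, hg]
          by_cases hcond : i ≤ s + c
          · obtain ⟨hp1, hp2⟩ := ih (i + 1) (s + c) cache (by omega) h1 hinv
            obtain ⟨hk1, hk2⟩ := ih (i + 1) s (dpBgo n card f (i + 1) (s + c) cache).2 (by omega) h1 hp2
            simp only [if_pos hcond]
            refine ⟨?_, ?_⟩
            · rw [hA, if_pos hcond, hp1, hk1]
            · intro j s' v hget
              rw [PySem.Dict.get?_insert] at hget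
              split_ifs at hget with heq
              · rw [Prod.mk.injEq] at heq
                obtain ⟨hj, hs⟩ := heq
                subst hj; subst hs
                have hv := Option.some.inj hget
                rw [← hv, hA, if_pos hcond, hp1, hk1]
              · exact hk2 j s' v hget
          · obtain ⟨hr1, hr2⟩ := ih (i + 1) s cache (by omega) h1 hinv
            simp only [if_neg hcond]
            refine ⟨?_, ?_⟩
            · rw [hA, if_neg hcond, hr1]
            · intro j s' v hget
              rw [PySem.Dict.get?_insert] at hget
              split_ifs at hget with heq
              · rw [Prod.mk.injEq] at heq
                obtain ⟨hj, hs⟩ := heq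
                subst hj; subst hs
                have hv := Option.some.inj hget
                rw [← hv, hA, if_neg hcond, hr1]
              · exact hr2 j s' v hget

-- ===== VERDICT (by name: the statement is the Claim_ definition above) =====
theorem dp_spec : Claim_equal_dp := by
  intro i n card current_sum _hdom hpre
  unfold Spec_dp dp dp_alt
  have hinv : CacheInv n card PySem.Dict.empty := by
    intro j s v hget
    simp [PySem.Dict.get?_empty] at hget
  exact ((dpBgo_correct n card (n - i).toNat i current_sum PySem.Dict.empty hpre.1
    (le_refl _) hinv).1).symm
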